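-- pv_equiv track=rewrite | github.com/syncerpn/leetcode | 3805_count_caesar_cipher_pairs.py | countPairs
-- ===== SOURCE A (Python) =====
-- from typing import List
--
-- def countPairs(words: List[str]) -> int:
--     A = {c: i for i, c in enumerate("abcdefghijklmnopqrstuvwxyz")}
--     d = {}
--     ans = 0
--     for s in words:
--         t = tuple((A[c] - A[s[0]]) % 26 for c in s)
--         if t not in d:
--             d[t] = 0
--         d[t] += 1
--         ans += d[t] - 1
--     return ans
-- ===== SOURCE B (Python) =====
-- from typing import List
--
-- ALPHA = "abcdefghijklmnopqrstuvwxyz"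
--
-- def countPairs(words: List[str]) -> int:
--     # canonical key of a word: alphabet offsets from its first letter, mod 26
--     keys = sorted(tuple((ALPHA.index(c) - ALPHA.index(s[0])) % 26 for c in s) for s in words)
--     # scan runs of equal keys in the sorted list; a run of length r gives r*(r-1)//2 pairs
--     ans = 0
--     i = 0
--     n = len(keys)
--     while i < n:
--         j = i + 1
--         while j < n and keys[j] == keys[i]:
--             j += 1
--         r = j - i
--         ans += r * (r - 1) // 2
--         i = j
--     return ans
-- ===== Notes on version B (the rewrite author's own statement) =====
-- stated objective: alternative
-- what changed: Replaces A's hash-dict with incremental pair accumulation (ans += count-1 per word) by sort-then-scan: canonicalize each word via ord arithmetic, sort the canonical keys, and sum r*(r-1)//2 over maximal runs of equal keys found with a two-pointer scan.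
import Mathlib
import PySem

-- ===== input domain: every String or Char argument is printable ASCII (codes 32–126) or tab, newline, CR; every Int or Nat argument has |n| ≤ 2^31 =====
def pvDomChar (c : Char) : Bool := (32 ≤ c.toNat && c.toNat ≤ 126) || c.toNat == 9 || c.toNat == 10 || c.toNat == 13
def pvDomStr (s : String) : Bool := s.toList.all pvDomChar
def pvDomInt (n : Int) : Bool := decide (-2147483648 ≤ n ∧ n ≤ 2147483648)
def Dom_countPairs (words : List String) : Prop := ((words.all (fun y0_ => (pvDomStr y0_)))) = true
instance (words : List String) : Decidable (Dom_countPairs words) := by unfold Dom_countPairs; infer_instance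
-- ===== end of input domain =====

-- B replaces A's hash-dict incremental pair accumulator by sort-then-run-scan: canonicalize, sort the keys, and sum r*(r-1)//2 over runs of equal keys (alternative algorithm, not faster).

-- the lowercase alphabet as a literal char list (used by Pre_/Raises_ and the proofs)
def pvAbc : List Char :=
  ['a','b','c','d','e','f','g','h','i','j','k','l','m',
   'n','o','p','q','r','s','t','u','v','w','x','y','z']

-- ===== PORT A =====
-- A = {c: i for i, c in enumerate("abcdefghijklmnopqrstuvwxyz")}
def pvAlpha : PySem.Dict Char Int :=
  (PySem.List.enumerate "abcdefghijklmnopqrstuvwxyz".toList 0).foldl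
    (fun d p => d.insert p.2 p.1) PySem.Dict.empty

-- t = tuple((A[c] - A[s[0]]) % 26 for c in s); A[·] total via getD and s[0] via headD
-- (Pre_ excludes the KeyError / IndexError inputs, where Python A raises)
def pvCanonA (s : String) : List Int :=
  s.toList.map (fun c =>
    PySem.Int.mod (pvAlpha.getD c 0 - pvAlpha.getD (s.toList.headD ' ') 0) 26)

def pvStepA (st : PySem.Dict (List Int) Int × Int) (s : String) :
    PySem.Dict (List Int) Int × Int :=
  let t := pvCanonA s
  let d := if st.1.contains t then st.1 else st.1.insert t 0   -- if t not in d: d[t] = 0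
  let v := d.getD t 0 + 1                                      -- d[t] += 1
  (d.insert t v, st.2 + (v - 1))                               -- ans += d[t] - 1

def countPairs (words : List String) : Int :=
  (words.foldl pvStepA ((PySem.Dict.empty : PySem.Dict (List Int) Int), (0 : Int))).2

-- ===== PORT B =====
-- ALPHA.index(c): position of c in the alphabet (total via getD; Pre_ excludes the ValueError inputs)
def pvIdxB (c : Char) : Int :=
  (((PySem.List.index? "abcdefghijklmnopqrstuvwxyz".toList c).getD 0 : Nat) : Int)

-- key = tuple((ALPHA.index(c) - ALPHA.index(s[0])) % 26 for c in s); s[0] via headD (never reached for an empty word)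
def pvCanonB (s : String) : List Int :=
  s.toList.map (fun c =>
    PySem.Int.mod (pvIdxB c - pvIdxB (s.toList.headD ' ')) 26)

-- the lexicographic linear order on List Int = Python's tuple-of-int comparison
@[reducible] def pvLO : LinearOrder (List Int) := inferInstance

-- the run scan: j advances over keys equal to keys[i] (takeWhile), ans += r*(r-1)//2, i = j (dropWhile);
-- the Nat argument is fuel = the list length, only to make the recursion structural (never hit)
def pvRunPairsGo : Nat → List (List Int) → Int
  | _, [] => 0
  | 0, _ :: _ => 0
  | fuel + 1, k :: rest =>
    let r : Int := ((rest.takeWhile (fun y => y == k)).length : Nat) + 1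
    PySem.Int.floordiv (r * (r - 1)) 2 + pvRunPairsGo fuel (rest.dropWhile (fun y => y == k))

def pvRunPairs (l : List (List Int)) : Int := pvRunPairsGo l.length l

-- keys = sorted(canonical keys); then the run scan
def countPairs_alt (words : List String) : Int :=
  pvRunPairs
    (@PySem.List.sorted (List Int) (List Int) pvLO.toLT LinearOrder.toDecidableLT
      (words.map pvCanonB) (fun x => x) false)

-- ===== PRECONDITION & SPEC =====
-- Pre_ excludes exactly the inputs where Python A raises: a word with a character outside
-- a-z (KeyError in A's alphabet dict; on those inputs B raises ValueError).
def Pre_countPairs (words : List String) : Prop :=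
  ∀ s ∈ words, s.toList.all (fun c => decide (c ∈ pvAbc)) = true
instance (words : List String) : Decidable (Pre_countPairs words) := by
  unfold Pre_countPairs; infer_instance

def pvWitness_countPairs : List String := ["abc", "bcd", "xy"]

def Spec_countPairs (words : List String) (out : Int) : Prop := out = countPairs_alt words
instance (words : List String) (out : Int) : Decidable (Spec_countPairs words out) := by unfold Spec_countPairs; infer_instance

-- ===== CLAIM (what is proved, stated in full; the proofs are below) =====
def Claim_equal_countPairs : Prop := ∀ (words : List String), Dom_countPairs words → Pre_countPairs words → Spec_countPairs words (countPairs words)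

-- ===== LEMMAS AND PROOFS =====

-- the ground truth both programs compute: for each element, its count among the later elements
def pvS : List (List Int) → Int
  | [] => 0
  | k :: ks => (ks.count k : Int) + pvS ks

-- A's running total: for each key, its count among the earlier keys (p = prefix already seen)
def pvW : List (List Int) → List (List Int) → Int
  | _, [] => 0
  | p, k :: ks => (p.count k : Int) + pvW (p ++ [k]) ks

lemma pvAbc_nodup : pvAbc.Nodup := by decide

lemma pvHlit : "abcdefghijklmnopqrstuvwxyz".toList = pvAbc := by decide

lemma pvAbc_toNat : ∀ j ∈ List.range 26, (pvAbc.map Char.toNat)[j]? = some (97 + j) := by decide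

lemma pvAlpha_items : pvAlpha.items =
    (PySem.List.enumerate pvAbc 0).map (fun a => (a.2, a.1)) := by
  unfold pvAlpha
  rw [pvHlit]
  have h := PySem.Dict.items_foldl_insert_fresh (PySem.List.enumerate pvAbc 0)
    (fun p => p.2) (fun p => p.1) PySem.Dict.empty
    (fun a _ => by simp)
    (by rw [PySem.List.map_snd_enumerate]; exact pvAbc_nodup)
  simpa using h

lemma pvAlpha_keysNodup : pvAlpha.keys.Nodup := by
  have hk : pvAlpha.keys = pvAbc := by
    simp only [PySem.Dict.keys, pvAlpha_items, List.map_map]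
    exact PySem.List.map_snd_enumerate pvAbc 0
  rw [hk]; exact pvAbc_nodup

lemma pvAlpha_getD (c : Char) (hc : c ∈ pvAbc) :
    pvAlpha.getD c 0 = (c.toNat : Int) - 97 := by
  obtain ⟨j, hj, hcj⟩ := List.mem_iff_getElem.mp hc
  have hlen : j < (PySem.List.enumerate pvAbc 0).length := by
    rw [PySem.List.length_enumerate]; exact hj
  have hmem : (c, (j : Int)) ∈ pvAlpha.items := by
    rw [pvAlpha_items]
    refine List.mem_map.mpr ⟨(PySem.List.enumerate pvAbc 0)[j], List.getElem_mem hlen, ?_⟩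
    rw [PySem.List.getElem_enumerate]
    simp [hcj]
  have hj97 : c.toNat = 97 + j := by
    have hq := pvAbc_toNat j (by simpa [List.mem_range] using hj)
    have hq2 : (pvAbc.map Char.toNat)[j]? = some c.toNat := by
      rw [List.getElem?_eq_getElem (by simpa using hj)]
      simp [hcj]
    rw [hq2] at hq
    exact Option.some.inj hq
  rw [PySem.Dict.getD_of_mem_items pvAlpha hmem pvAlpha_keysNodup 0, hj97]
  push_cast; ring

-- ALPHA.index agrees with A's alphabet dict on a-z
lemma pvIdx_all : (pvAbc.all (fun c => pvIdxB c == (c.toNat : Int) - 97)) = true := by decide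

lemma pvIdx_eq (c : Char) (hc : c ∈ pvAbc) : pvIdxB c = (c.toNat : Int) - 97 := by
  have h := List.all_eq_true.mp pvIdx_all c hc
  simpa using h

lemma pvCanon_eq (s : String)
    (hall : ∀ c ∈ s.toList, c ∈ pvAbc) :
    pvCanonA s = pvCanonB s := by
  unfold pvCanonA pvCanonB
  apply List.map_congr_left
  intro c hc
  have hne : s.toList ≠ [] := by
    intro he
    rw [he] at hc
    exact absurd hc (List.not_mem_nil)
  have hhead : s.toList.headD ' ' ∈ s.toList := by
    cases h : s.toList with
    | nil => exact absurd h hne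
    | cons a l => simp
  rw [pvAlpha_getD c (hall c hc), pvAlpha_getD _ (hall _ hhead),
    pvIdx_eq c (hall c hc), pvIdx_eq _ (hall _ hhead)]

-- A's loop body: the answer gains the current key's count so far
lemma pvStepA_snd (d : PySem.Dict (List Int) Int) (ans : Int) (s : String) :
    (pvStepA (d, ans) s).2 = ans + d.getD (pvCanonA s) 0 := by
  unfold pvStepA
  by_cases hc : d.contains (pvCanonA s)
  · simp only [hc, if_true]; ring
  · have hcf : d.contains (pvCanonA s) = false := by simpa using hc
    have hD : d.getD (pvCanonA s) 0 = 0 := PySem.Dict.getD_of_not_contains d 0 hcf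
    simp only [hc, if_false, Bool.false_eq_true, PySem.Dict.getD_insert_self, hD]
    ring

-- A's loop body: the dict's count at each key is bumped exactly at the current key
lemma pvStepA_fst_getD (d : PySem.Dict (List Int) Int) (ans : Int) (s : String)
    (k : List Int) :
    (pvStepA (d, ans) s).1.getD k 0
      = d.getD k 0 + (if k = pvCanonA s then 1 else 0) := by
  unfold pvStepA
  by_cases hc : d.contains (pvCanonA s)
  · simp only [hc, if_true, PySem.Dict.getD_insert]
    split_ifs with h
    · rw [h]
    · ring
  · have hcf : d.contains (pvCanonA s) = false := by simpa using hc
    have hD : d.getD (pvCanonA s) 0 = 0 := PySem.Dict.getD_of_not_contains d 0 hcf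
    simp only [hc, if_false, Bool.false_eq_true, PySem.Dict.insert_insert_self,
      PySem.Dict.getD_insert, hD]
    split_ifs with h
    · rw [h, hD]
    · ring

-- A's loop invariant: the dict counts the processed prefix p, the answer grows by pvW
set_option maxRecDepth 8192 in
lemma pvA_inv (ws : List String) (p : List (List Int)) (d : PySem.Dict (List Int) Int)
    (ans : Int) (hd : ∀ k, d.getD k 0 = (p.count k : Int)) :
    (ws.foldl pvStepA (d, ans)).2 = ans + pvW p (ws.map pvCanonA) := by
  induction ws generalizing p d ans with
  | nil => simp [pvW]
  | cons s ws ih =>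
    simp only [List.foldl_cons, List.map_cons, pvW]
    have hstep : pvStepA (d, ans) s
        = ((pvStepA (d, ans) s).1, ans + (p.count (pvCanonA s) : Int)) := by
      rw [← hd (pvCanonA s), ← pvStepA_snd d ans s]
    rw [hstep, ih (p ++ [pvCanonA s]) _ _ ?_]
    · ring
    · intro k
      rw [pvStepA_fst_getD d ans s k, hd k, List.count_append]
      by_cases h : k = pvCanonA s
      · subst h
        simp
      · have hb : ((pvCanonA s) == k) = false :=
          beq_eq_false_iff_ne.mpr (fun he => h he.symm)
        simp [h, List.count_cons, hb]

-- pvW splits into a cross term against the prefix plus pvS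
set_option maxRecDepth 8192 in
lemma pvW_eq (ks : List (List Int)) : ∀ p,
    pvW p ks = (ks.map (fun k => (p.count k : Int))).sum + pvS ks := by
  induction ks with
  | nil => intro p; simp [pvW, pvS]
  | cons k ks ih =>
    intro p
    simp only [pvW, pvS, List.map_cons, List.sum_cons, ih (p ++ [k])]
    have hmap : (ks.map (fun x => ((p ++ [k]).count x : Int))).sum
        = (ks.map (fun x => (p.count x : Int))).sum + (ks.count k : Int) := by
      have h1 : (ks.map (fun x => ((p ++ [k]).count x : Int)))
          = ks.map (fun x => (p.count x : Int) + (if x = k then 1 else 0)) := by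
        apply List.map_congr_left
        intro x _
        rw [List.count_append]
        by_cases h : x = k
        · subst h
          simp
        · have hb : (k == x) = false :=
            beq_eq_false_iff_ne.mpr (fun he => h he.symm)
          simp [h, List.count_cons, hb]
      rw [h1, PySem.List.sum_map_add_int]
      have h2 : (ks.map (fun x => (if x = k then (1 : Int) else 0))).sum
          = (ks.countP (fun x => x == k) : Int) := by
        rw [← PySem.List.sum_map_ite_one_zero]
        congr 1
        apply List.map_congr_left
        intro x _
        by_cases h : x = k <;> simp [h]
      rw [h2, List.count]
    rw [hmap]
    ring

-- pvS is invariant under permutation (it counts unordered equal pairs)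
set_option maxRecDepth 8192 in
lemma pvS_perm {l₁ l₂ : List (List Int)} (h : l₁.Perm l₂) : pvS l₁ = pvS l₂ := by
  induction h with
  | nil => rfl
  | cons x _ ih => simp [pvS, ih, List.Perm.count_eq (by assumption)]
  | swap x y l =>
    simp only [pvS, List.count_cons]
    by_cases h : x = y
    · subst h
      simp
    · have h1 : (y == x) = false := beq_eq_false_iff_ne.mpr (fun he => h he.symm)
      have h2 : (x == y) = false := beq_eq_false_iff_ne.mpr h
      simp only [h1, h2]
      push_cast
      ring
  | trans _ _ ih1 ih2 => rw [ih1, ih2]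

-- floordiv step for consecutive triangular numbers
lemma pvF_step (k : Int) :
    PySem.Int.floordiv ((k + 1) * k) 2 = PySem.Int.floordiv (k * (k - 1)) 2 + k := by
  have h1 := PySem.Int.floordiv_mul_add_mod ((k + 1) * k) 2
  have h2 := PySem.Int.floordiv_mul_add_mod (k * (k - 1)) 2
  have e1 : PySem.Int.mod ((k + 1) * k) 2 = 0 := by
    rw [PySem.Int.mod_eq_zero_iff_dvd]
    have h : (k + 1) * k = k * (k + 1) := by ring
    rw [h]
    exact (Int.even_mul_succ_self k).two_dvd
  have e2 : PySem.Int.mod (k * (k - 1)) 2 = 0 := by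
    rw [PySem.Int.mod_eq_zero_iff_dvd]
    have h : k * (k - 1) = (k - 1) * ((k - 1) + 1) := by ring
    rw [h]
    exact (Int.even_mul_succ_self (k - 1)).two_dvd
  rw [e1] at h1; rw [e2] at h2
  nlinarith [h1, h2]

-- a block of n equal keys in front of a k-free tail contributes n*(n-1)//2
lemma pvS_replicate (n : Nat) (k : List Int) (d : List (List Int))
    (hd : d.count k = 0) :
    pvS (List.replicate n k ++ d)
      = PySem.Int.floordiv ((n : Int) * ((n : Int) - 1)) 2 + pvS d := by
  induction n with
  | zero => simp [PySem.Int.floordiv]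
  | succ n ih =>
    rw [List.replicate_succ, List.cons_append]
    simp only [pvS, ih, List.count_append, List.count_replicate_self, hd]
    have hstep : PySem.Int.floordiv ((((n : Int)) + 1) * ((n : Int))) 2
        = PySem.Int.floordiv ((n : Int) * ((n : Int) - 1)) 2 + (n : Int) := by
      have h := pvF_step (n : Int)
      simpa using h
    push_cast
    rw [show ((n : Int) + 1 - 1) = (n : Int) by ring, hstep]
    ring

-- on a ≤-sorted list the run scan computes pvS
lemma pvRun_sorted_go (fuel : Nat) (l : List (List Int)) (hf : l.length ≤ fuel)
    (h : List.Pairwise (fun a b => pvLO.le a b) l) : pvRunPairsGo fuel l = pvS l := by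
  induction fuel generalizing l with
  | zero =>
    cases l with
    | nil => simp [pvRunPairsGo, pvS]
    | cons k rest => simp at hf
  | succ fuel ihf =>
  match l with
  | [] => simp [pvRunPairsGo, pvS]
  | k :: rest =>
    have hrest : List.Pairwise (fun a b => pvLO.le a b) rest :=
      (List.pairwise_cons.mp h).2
    have hk : ∀ y ∈ rest, pvLO.le k y := (List.pairwise_cons.mp h).1
    set t := rest.takeWhile (fun y => y == k) with ht
    set d := rest.dropWhile (fun y => y == k) with hdd
    have hsplit : rest = t ++ d := (List.takeWhile_append_dropWhile).symm
    have htk : ∀ y ∈ t, y = k := by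
      intro y hy
      have := List.mem_takeWhile_imp hy
      simpa using this
    have htrep : t = List.replicate t.length k := List.eq_replicate_of_mem htk
    have hdpw : List.Pairwise (fun a b => pvLO.le a b) d := by
      rw [hsplit] at hrest
      exact (List.pairwise_append.mp hrest).2.1
    have hdk : d.count k = 0 := by
      rw [List.count_eq_zero]
      intro hkd
      have hne : List.dropWhile (fun y => y == k) rest ≠ [] := by
        rw [← hdd]
        intro he
        rw [he] at hkd
        exact List.not_mem_nil hkd
      have hhne := List.head_dropWhile_not (fun y => y == k) hne
      have hdcons : d = (List.dropWhile (fun y => y == k) rest).head hne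
          :: (List.dropWhile (fun y => y == k) rest).tail := by
        rw [hdd]
        exact (List.cons_head_tail hne).symm
      set hh := (List.dropWhile (fun y => y == k) rest).head hne with hhh
      have hhk : hh ≠ k := fun he => by simp [he] at hhne
      rcases List.mem_cons.mp (hdcons ▸ hkd) with he | hm
      · exact hhk he.symm
      · have h1 : pvLO.le hh k := by
          rw [hdcons] at hdpw
          exact (List.pairwise_cons.mp hdpw).1 k hm
        have h2 : pvLO.le k hh := hk hh (by rw [hsplit, hdcons]; simp)
        exact hhk (pvLO.le_antisymm hh k h1 h2)
    have hdf : d.length ≤ fuel := by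
      rw [hdd]
      have h1 := List.length_dropWhile_le (fun y => y == k) rest
      simp only [List.length_cons] at hf
      omega
    have ih : pvRunPairsGo fuel d = pvS d := ihf d hdf hdpw
    have hSl : pvS (k :: rest) = pvS (List.replicate (t.length + 1) k ++ d) := by
      rw [hsplit, htrep]
      rw [List.replicate_succ, List.cons_append, List.length_replicate]
    rw [hSl, pvS_replicate (t.length + 1) k d hdk]
    simp only [pvRunPairsGo, ← ht, ← hdd, ih]
    push_cast
    ring_nf

lemma pvRun_sorted (l : List (List Int))
    (h : List.Pairwise (fun a b => pvLO.le a b) l) : pvRunPairs l = pvS l :=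
  pvRun_sorted_go l.length l le_rfl h

-- ===== VERDICT (by name: the statement is the Claim_ definition above) =====
theorem countPairs_spec : Claim_equal_countPairs := by
  intro words _ hpre
  unfold Spec_countPairs countPairs countPairs_alt
  have hA : (words.foldl pvStepA ((PySem.Dict.empty : PySem.Dict (List Int) Int), (0 : Int))).2
      = pvS (words.map pvCanonA) := by
    rw [pvA_inv words [] _ 0 (fun k => by simp [PySem.Dict.getD_empty]), pvW_eq]
    simp [List.count_nil, Function.comp_def]
  have hcan : words.map pvCanonA = words.map pvCanonB := by
    apply List.map_congr_left
    intro s hs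
    refine pvCanon_eq s ?_
    intro c hc
    simpa using List.all_eq_true.mp (hpre s hs) c hc
  rw [hA, hcan]
  have hperm : (@PySem.List.sorted (List Int) (List Int) pvLO.toLT LinearOrder.toDecidableLT
      (words.map pvCanonB) (fun x => x) false).Perm (words.map pvCanonB) :=
    @PySem.List.sorted_perm (List Int) (List Int) pvLO.toLT LinearOrder.toDecidableLT
      (words.map pvCanonB) (fun x => x) false
  rw [pvS_perm hperm.symm]
  exact (pvRun_sorted _ (PySem.List.sorted_pairwise (words.map pvCanonB) (fun x => x))).symm
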